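-- pv_equiv track=rewrite | github.com/Ncu-uu/VsCode | PythonProject/python_book/Basic_Learning/wallshall.py | wallshall
-- ===== SOURCE A (Python) =====
-- def wallshall(n, m, relations):
--     # 初始化胜负关系矩阵
--     matrix = [[0] * n for _ in range(n)]
--     for a, b in relations:
--         matrix[a-1][b-1] = 1
--
--     # 使用Floyd-Warshall算法更新胜负关系矩阵
--     for k in range(n):
--         for i in range(n):
--             for j in range(n):
--                 if matrix[i][k] and matrix[k][j]:
--                     matrix[i][j] = 1
--
--     # 统计能确定最终排名的牛的数量
--     count = 0
--     for i in range(n):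
--         if sum(matrix[i]) + sum(row[i] for row in matrix) == n - 1:
--             count += 1
--
--     return count
-- ===== SOURCE B (Python) =====
-- # Per-cow BFS over 0-based adjacency lists instead of an O(n^3) all-pairs closure:
-- # a cow's rank is fixed iff it is comparable (beats or loses to) every other cow.
-- def wallshall(n, m, relations):
--     adj = [[] for _ in range(n)]
--     for a, b in relations:
--         adj[a - 1].append(b - 1)
--     reach = []
--     for s in range(n):
--         # BFS by frontier levels; a shortest chain of wins among n cows has
--         # fewer than n links, so n rounds explore everything reachable.
--         seen = [False] * n
--         frontier = adj[s]
--         for _ in range(n):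
--             if not frontier:
--                 break
--             nxt = []
--             for v in frontier:
--                 if not seen[v]:
--                     seen[v] = True
--                     nxt.extend(adj[v])
--             frontier = nxt
--         reach.append(seen)
--     count = 0
--     for i in range(n):
--         if sum(reach[i]) + sum(reach[s][i] for s in range(n)) == n - 1:
--             count += 1
--     return count
-- ===== Notes on version B (the rewrite author's own statement) =====
-- stated objective: faster
-- what changed: Replaces the O(n^3) Floyd-Warshall all-pairs closure on an n x n matrix by a per-cow BFS frontier expansion over 0-based adjacency lists, counting out- and in-reachability from the n boolean reachability rows.
import Mathlib
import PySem

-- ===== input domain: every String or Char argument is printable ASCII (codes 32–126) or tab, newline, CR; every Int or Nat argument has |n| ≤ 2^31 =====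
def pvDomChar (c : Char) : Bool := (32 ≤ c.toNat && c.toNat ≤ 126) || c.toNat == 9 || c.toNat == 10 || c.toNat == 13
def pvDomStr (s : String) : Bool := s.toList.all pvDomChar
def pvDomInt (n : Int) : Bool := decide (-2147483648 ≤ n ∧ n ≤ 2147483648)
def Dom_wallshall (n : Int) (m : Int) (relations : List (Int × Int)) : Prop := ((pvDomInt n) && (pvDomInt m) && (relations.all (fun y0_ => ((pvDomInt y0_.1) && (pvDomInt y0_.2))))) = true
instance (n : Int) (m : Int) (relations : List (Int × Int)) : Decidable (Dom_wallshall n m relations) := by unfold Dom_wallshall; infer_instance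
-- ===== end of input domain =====

set_option maxHeartbeats 1600000

-- B replaces A's O(n^3) Floyd–Warshall closure by per-cow BFS frontier expansion over
-- 0-based adjacency lists (objective: faster, asymptotically O(n·(n+m)) instead of O(n^3)).

-- ===== PORT A =====
-- matrix[i][j] read (in-range under Pre_)
def pvG (mat : List (List Int)) (i j : Int) : Int :=
  PySem.List.pyGetD (PySem.List.pyGetD mat i []) j 0
-- matrix[i][j] = v (in-range under Pre_)
def pvSetCell (mat : List (List Int)) (i j v : Int) : List (List Int) :=
  PySem.List.pySetD mat i (PySem.List.pySetD (PySem.List.pyGetD mat i []) j v)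
-- matrix init: [[0]*n for _ in range(n)] then matrix[a-1][b-1] = 1
def pvInit (n : Int) (relations : List (Int × Int)) : List (List Int) :=
  relations.foldl (fun mat p => pvSetCell mat (p.1 - 1) (p.2 - 1) 1)
    (List.replicate n.toNat (List.replicate n.toNat 0))
-- one pivot pass: for i in range(n): for j in range(n): if matrix[i][k] and matrix[k][j]: matrix[i][j] = 1
def pvPass (n k : Int) (mat : List (List Int)) : List (List Int) :=
  (PySem.List.pyRange 0 n 1).foldl (fun mat i =>
    (PySem.List.pyRange 0 n 1).foldl (fun mat j =>
      if pvG mat i k ≠ 0 ∧ pvG mat k j ≠ 0 then pvSetCell mat i j 1 else mat) mat) mat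
-- for k in range(n): …
def pvFW (n : Int) (mat : List (List Int)) : List (List Int) :=
  (PySem.List.pyRange 0 n 1).foldl (fun mat k => pvPass n k mat) mat

def wallshall (n : Int) (m : Int) (relations : List (Int × Int)) : Int :=
  let mat := pvFW n (pvInit n relations)
  (PySem.List.pyRange 0 n 1).foldl (fun count i =>
    if (PySem.List.pyGetD mat i []).sum
        + (mat.map (fun row => PySem.List.pyGetD row i 0)).sum = n - 1
    then count + 1 else count) 0

-- ===== PORT B =====
-- adj = [[] for _ in range(n)]; adj[a-1].append(b-1)
def pvAdjL (n : Int) (relations : List (Int × Int)) : List (List Int) :=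
  relations.foldl (fun adj p =>
    PySem.List.pySetD adj (p.1 - 1) (PySem.List.pyGetD adj (p.1 - 1) [] ++ [p.2 - 1]))
    (List.replicate n.toNat [])
-- one BFS round: for v in frontier: if not seen[v]: seen[v] = True; nxt.extend(adj[v])
def pvRoundB (adj : List (List Int)) (st : List Bool × List Int) : List Bool × List Int :=
  st.2.foldl (fun acc v =>
    if PySem.List.pyGetD acc.1 v false then acc
    else (PySem.List.pySetD acc.1 v true, acc.2 ++ PySem.List.pyGetD adj v [])) (st.1, [])
-- seen = [False]*n; frontier = adj[s]; for _ in range(n): if not frontier: break; …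
def pvSeen (n : Int) (adj : List (List Int)) (s : Int) : List Bool :=
  ((PySem.List.pyRange 0 n 1).foldl (fun st _ => if st.2 = [] then st else pvRoundB adj st)
    (List.replicate n.toNat false, PySem.List.pyGetD adj s [])).1

def wallshall_alt (n : Int) (m : Int) (relations : List (Int × Int)) : Int :=
  let adj := pvAdjL n relations
  let reach := (PySem.List.pyRange 0 n 1).foldl
    (fun acc s => acc ++ [pvSeen n adj s]) ([] : List (List Bool))
  (PySem.List.pyRange 0 n 1).foldl (fun count i =>
    if ((PySem.List.pyGetD reach i []).count true : Int)
        + (PySem.List.pyRange 0 n 1).foldl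
            (fun t s => if PySem.List.pyGetD (PySem.List.pyGetD reach s []) i false then t + 1 else t) 0
        = n - 1
    then count + 1 else count) 0

-- ===== PRECONDITION & SPEC =====
-- Pre_ is exactly A's domain: matrix[a-1][b-1] needs -n ≤ a-1 < n and -n ≤ b-1 < n
-- (Python wraps negative indices; anything else raises IndexError, and every access
-- raises when the matrix is empty).
def Pre_wallshall (n : Int) (m : Int) (relations : List (Int × Int)) : Prop :=
  ∀ p ∈ relations, 1 - n ≤ p.1 ∧ p.1 ≤ n ∧ 1 - n ≤ p.2 ∧ p.2 ≤ n
instance (n : Int) (m : Int) (relations : List (Int × Int)) : Decidable (Pre_wallshall n m relations) := by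
  unfold Pre_wallshall; infer_instance

def pvWitness_wallshall : Int × Int × (List (Int × Int)) := (3, 2, [(1, 2), (2, 3)])

def Spec_wallshall (n : Int) (m : Int) (relations : List (Int × Int)) (out : Int) : Prop := out = wallshall_alt n m relations
instance (n : Int) (m : Int) (relations : List (Int × Int)) (out : Int) : Decidable (Spec_wallshall n m relations out) := by unfold Spec_wallshall; infer_instance

-- ===== CLAIM (what is proved, stated in full; the proofs are below) =====
def Claim_equal_wallshall : Prop := ∀ (n : Int) (m : Int) (relations : List (Int × Int)), Dom_wallshall n m relations → Pre_wallshall n m relations → Spec_wallshall n m relations (wallshall n m relations)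

-- ===== LEMMAS AND PROOFS =====

-- edges of relations as 0-based matrix indices (with Python's negative-index wrap)
def pvE0 (n : Int) (relations : List (Int × Int)) : List (Int × Int) :=
  relations.map (fun p => (PySem.Int.mod (p.1 - 1) n, PySem.Int.mod (p.2 - 1) n))

theorem pv_emod_lo (a n : Int) (hn : 0 < n) : 0 ≤ a % n := Int.emod_nonneg a (by omega)

theorem pv_emod_hi (a n : Int) (hn : 0 < n) : a % n < n := Int.emod_lt_of_pos a hn

theorem pv_emod_id (a n : Int) (h1 : 0 ≤ a) (h2 : a < n) : a % n = a := Int.emod_eq_of_lt h1 h2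

theorem pv_emod_neg (a n : Int) (hn : 0 < n) (h1 : -n ≤ a) (h2 : a < 0) : a % n = a + n := by
  have h3 : (a + n * 1) % n = a % n := Int.add_mul_emod_self_left a n 1
  have h4 : (a + n * 1) % n = a + n * 1 := Int.emod_eq_of_lt (by omega) (by omega)
  omega

theorem pvE0_bounds {n : Int} {relations : List (Int × Int)} (hn : 0 < n) :
    ∀ q ∈ pvE0 n relations, 0 ≤ q.1 ∧ q.1 < n ∧ 0 ≤ q.2 ∧ q.2 < n := by
  intro q hq
  simp only [pvE0, List.mem_map] at hq
  obtain ⟨p, hp, he⟩ := hq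
  subst he
  dsimp only
  rw [PySem.Int.mod_eq_emod_of_pos hn, PySem.Int.mod_eq_emod_of_pos hn]
  have e1 := pv_emod_lo (p.1 - 1) n hn
  have e2 := pv_emod_hi (p.1 - 1) n hn
  have e3 := pv_emod_lo (p.2 - 1) n hn
  have e4 := pv_emod_hi (p.2 - 1) n hn
  omega

-- reachability by a path of length ≥ 1
inductive Rch (E : List (Int × Int)) : Int → Int → Prop
  | edge {a b : Int} (h : (a, b) ∈ E) : Rch E a b
  | tail {a b c : Int} (h : Rch E a b) (h2 : (b, c) ∈ E) : Rch E a c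

-- reachability by a path of length ≥ 1 with all intermediate nodes < k
inductive BRch (E : List (Int × Int)) (k : Int) : Int → Int → Prop
  | edge {a b : Int} (h : (a, b) ∈ E) : BRch E k a b
  | comp {a v b : Int} (h1 : BRch E k a v) (h2 : BRch E k v b) (hv : v < k) : BRch E k a b

theorem rch_target {E : List (Int × Int)} {a b : Int} (h : Rch E a b) : ∃ p ∈ E, p.2 = b := by
  induction h with
  | edge h => exact ⟨_, h, rfl⟩
  | tail h h2 ih => exact ⟨_, h2, rfl⟩

theorem brch_target {E : List (Int × Int)} {k a b : Int} (h : BRch E k a b) : ∃ p ∈ E, p.2 = b := by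
  induction h with
  | edge h => exact ⟨_, h, rfl⟩
  | comp h1 h2 hv ih1 ih2 => exact ih2

theorem rch_trans {E : List (Int × Int)} {a v b : Int} (h1 : Rch E a v) (h2 : Rch E v b) : Rch E a b := by
  induction h2 with
  | edge h => exact Rch.tail h1 h
  | tail h h2 ih => exact Rch.tail ih h2

theorem brch_mono {E : List (Int × Int)} {k k' a b : Int} (h : BRch E k a b) (hk : k ≤ k') : BRch E k' a b := by
  induction h with
  | edge h => exact BRch.edge h
  | comp h1 h2 hv ih1 ih2 => exact BRch.comp ih1 ih2 (lt_of_lt_of_le hv hk)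

theorem brch_zero {E : List (Int × Int)} (ht : ∀ p ∈ E, 0 ≤ p.2) {a b : Int} :
    BRch E 0 a b ↔ (a, b) ∈ E := by
  constructor
  · intro h
    induction h with
    | edge h => exact h
    | comp h1 h2 hv ih1 ih2 =>
      obtain ⟨p, hp, hp2⟩ := brch_target h1
      exact absurd hv (not_lt.mpr (hp2 ▸ ht p hp))
  · exact fun h => BRch.edge h

theorem brch_succ {E : List (Int × Int)} {k a b : Int} :
    BRch E (k + 1) a b ↔ BRch E k a b ∨ (BRch E k a k ∧ BRch E k k b) := by
  constructor
  · intro h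
    induction h with
    | edge h => exact Or.inl (BRch.edge h)
    | comp h1 h2 hv ih1 ih2 =>
      rename_i a v b
      rcases eq_or_lt_of_le (Int.lt_add_one_iff.mp hv) with hvk | hvk
      · subst hvk
        have l1 : BRch E v a v := by
          rcases ih1 with h | ⟨h, _⟩ <;> exact h
        have l2 : BRch E v v b := by
          rcases ih2 with h | ⟨_, h⟩ <;> exact h
        exact Or.inr ⟨l1, l2⟩
      · rcases ih1 with h1' | ⟨h1a, h1b⟩ <;> rcases ih2 with h2' | ⟨h2a, h2b⟩
        · exact Or.inl (BRch.comp h1' h2' hvk)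
        · exact Or.inr ⟨BRch.comp h1' h2a hvk, h2b⟩
        · exact Or.inr ⟨h1a, BRch.comp h1b h2' hvk⟩
        · exact Or.inr ⟨h1a, h2b⟩
  · rintro (h | ⟨h1, h2⟩)
    · exact brch_mono h (by omega)
    · exact BRch.comp (brch_mono h1 (by omega)) (brch_mono h2 (by omega)) (by omega)

theorem rch_iff_brch {E : List (Int × Int)} {n : Int} (ht : ∀ p ∈ E, p.2 < n) {a b : Int} :
    Rch E a b ↔ BRch E n a b := by
  constructor
  · intro h
    induction h with
    | edge h => exact BRch.edge h
    | tail h h2 ih =>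
      obtain ⟨p, hp, hp2⟩ := rch_target h
      exact BRch.comp ih (BRch.edge h2) (hp2 ▸ ht p hp)
  · intro h
    induction h with
    | edge h => exact Rch.edge h
    | comp h1 h2 hv ih1 ih2 => exact rch_trans ih1 ih2


-- ---- A-side: matrix shape / access lemmas ----

def pvSh (mat : List (List Int)) (N : Nat) : Prop :=
  mat.length = N ∧ ∀ r ∈ mat, r.length = N

def pvBin (mat : List (List Int)) : Prop :=
  ∀ r ∈ mat, ∀ x ∈ r, x = 0 ∨ x = 1

theorem pv_getD_or {α : Type} (l : List α) (k : Nat) (d : α) :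
    l.getD k d ∈ l ∨ l.getD k d = d := by
  by_cases h : k < l.length
  · left; rw [List.getD_eq_getElem l d h]; exact List.getElem_mem _
  · right; exact List.getD_eq_default l d (Nat.le_of_not_lt h)

theorem pvG_nonneg (mat : List (List Int)) {i j : Int} (hi : 0 ≤ i) (hj : 0 ≤ j) :
    pvG mat i j = (mat.getD i.toNat []).getD j.toNat 0 := by
  have hi' : ((i.toNat : Nat) : Int) = i := Int.toNat_of_nonneg hi
  have hj' : ((j.toNat : Nat) : Int) = j := Int.toNat_of_nonneg hj
  rw [pvG, ← hi', ← hj', PySem.List.pyGetD_natCast, PySem.List.pyGetD_natCast]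
  simp [max_eq_left hi, max_eq_left hj]

theorem pvG_bin {mat : List (List Int)} (hb : pvBin mat) {i j : Int} (hi : 0 ≤ i) (hj : 0 ≤ j) :
    pvG mat i j = 0 ∨ pvG mat i j = 1 := by
  rw [pvG_nonneg mat hi hj]
  rcases pv_getD_or mat i.toNat [] with hr | hr
  · rcases pv_getD_or (mat.getD i.toNat []) j.toNat 0 with hx | hx
    · exact hb _ hr _ hx
    · exact Or.inl hx
  · rw [hr]; simp

theorem pv_getD_set_or {α : Type} (l : List α) (m t : Nat) (x d : α) :
    (l.set m x).getD t d = if m = t ∧ m < l.length then x else l.getD t d := by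
  rw [List.getD_eq_getElem?_getD, List.getElem?_set, List.getD_eq_getElem?_getD]
  by_cases h : m = t
  · subst h
    by_cases h2 : m < l.length <;> simp [h2]
  · simp [h]

theorem pv_row_eq {mat : List (List Int)} {a : Int} (ha : 0 ≤ a) (haN : a.toNat < mat.length) :
    PySem.List.pyGetD mat a [] = mat[a.toNat] := by
  have ha' : ((a.toNat : Nat) : Int) = a := Int.toNat_of_nonneg ha
  conv_lhs => rw [← ha']
  rw [PySem.List.pyGetD_natCast]
  simp [List.getElem?_eq_getElem haN]

theorem pvSetCell_sh {mat : List (List Int)} {N : Nat} (hsh : pvSh mat N)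
    {a b : Int} (ha : 0 ≤ a ∧ a < (N : Int)) (v : Int) : pvSh (pvSetCell mat a b v) N := by
  obtain ⟨hlen, hrows⟩ := hsh
  have haN : a.toNat < mat.length := by omega
  constructor
  · rw [pvSetCell, PySem.List.length_pySetD]; exact hlen
  · intro r hr
    rw [pvSetCell, pv_row_eq ha.1 haN, PySem.List.pySetD_of_nonneg _ _ ha.1] at hr
    rcases List.mem_or_eq_of_mem_set hr with h | h
    · exact hrows r h
    · subst h
      rw [PySem.List.length_pySetD]
      exact hrows _ (List.getElem_mem haN)

theorem pvSetCell_G {mat : List (List Int)} {N : Nat} (hsh : pvSh mat N)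
    {a b : Int} (ha : 0 ≤ a ∧ a < (N : Int)) (hb : 0 ≤ b ∧ b < (N : Int)) (v : Int)
    {i j : Int} (hi : 0 ≤ i) (hj : 0 ≤ j) :
    pvG (pvSetCell mat a b v) i j = if i = a ∧ j = b then v else pvG mat i j := by
  obtain ⟨hlen, hrows⟩ := hsh
  have haN : a.toNat < mat.length := by omega
  have hrl : mat[a.toNat].length = N := hrows _ (List.getElem_mem haN)
  rw [pvSetCell, pv_row_eq ha.1 haN, PySem.List.pySetD_of_nonneg _ _ hb.1,
      PySem.List.pySetD_of_nonneg _ _ ha.1, pvG_nonneg _ hi hj, pv_getD_set_or]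
  by_cases h1 : i = a
  · rw [if_pos (by omega : a.toNat = i.toNat ∧ a.toNat < mat.length), pv_getD_set_or]
    by_cases h2 : j = b
    · rw [if_pos (by omega : b.toNat = j.toNat ∧ b.toNat < mat[a.toNat].length), if_pos ⟨h1, h2⟩]
    · rw [if_neg (by omega : ¬(b.toNat = j.toNat ∧ b.toNat < mat[a.toNat].length)),
          if_neg (by tauto), pvG_nonneg _ hi hj]
      congr 2
      rw [List.getD_eq_getElem mat [] (by omega : i.toNat < mat.length)]
      simp only [show a.toNat = i.toNat from by omega]
  · rw [if_neg (by omega : ¬(a.toNat = i.toNat ∧ a.toNat < mat.length)), if_neg (by tauto),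
        pvG_nonneg _ hi hj]

theorem pvSetCell_bin {mat : List (List Int)} {N : Nat} (hsh : pvSh mat N) (hb : pvBin mat)
    {a b : Int} (ha : 0 ≤ a ∧ a < (N : Int)) (hbb : 0 ≤ b) : pvBin (pvSetCell mat a b 1) := by
  obtain ⟨hlen, hrows⟩ := hsh
  have haN : a.toNat < mat.length := by omega
  intro r hr x hx
  rw [pvSetCell, pv_row_eq ha.1 haN, PySem.List.pySetD_of_nonneg _ _ ha.1] at hr
  rcases List.mem_or_eq_of_mem_set hr with h | h
  · exact hb r h x hx
  · subst h
    rw [PySem.List.pySetD_of_nonneg _ _ hbb] at hx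
    rcases List.mem_or_eq_of_mem_set hx with h | h
    · exact hb _ (List.getElem_mem haN) x h
    · exact Or.inr h


-- ---- Python's negative-index wraparound, normalised through emod ----

theorem pvIdx_wrap (N : Nat) {i : Int} (h1 : -(N : Int) ≤ i) (h2 : i < 0) :
    PySem.List.pyIdx? N i = PySem.List.pyIdx? N (i + N) := by
  simp only [PySem.List.pyIdx?]
  rw [if_neg (by omega), if_pos h1, if_pos (by omega : (0 : Int) ≤ i + N),
      if_pos (by omega : i + (N : Int) < N)]
  congr 1
  omega

theorem pyGetD_wrap {α : Type} (xs : List α) {i : Int} (d : α)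
    (h1 : -(xs.length : Int) ≤ i) (h2 : i < 0) :
    PySem.List.pyGetD xs i d = PySem.List.pyGetD xs (i + xs.length) d := by
  simp only [PySem.List.pyGetD, PySem.List.pyGet?, pvIdx_wrap xs.length h1 h2]

theorem pySetD_wrap {α : Type} (xs : List α) {i : Int} (v : α)
    (h1 : -(xs.length : Int) ≤ i) (h2 : i < 0) :
    PySem.List.pySetD xs i v = PySem.List.pySetD xs (i + xs.length) v := by
  simp only [PySem.List.pySetD, PySem.List.pySet?, pvIdx_wrap xs.length h1 h2]

-- pyGetD of a length-n list at a possibly negative (in-range) index = getD at the 0-based cell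
theorem pvGetD_norm {α : Type} (xs : List α) (d : α) {v n : Int} (hlen : (xs.length : Int) = n)
    (h1 : -n ≤ v) (h2 : v < n) :
    PySem.List.pyGetD xs v d = xs.getD (v % n).toNat d := by
  have hn : 0 < n := by omega
  have e1 := pv_emod_lo v n hn
  have e2 := pv_emod_hi v n hn
  by_cases hv : v < 0
  · have e3 := pv_emod_neg v n hn h1 hv
    rw [pyGetD_wrap xs d (by omega) hv,
        show v + (xs.length : Int) = (((v % n).toNat : Nat) : Int) from by omega,
        PySem.List.pyGetD_natCast]
  · have e3 := pv_emod_id v n (by omega) h2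
    conv_lhs => rw [show v = (((v % n).toNat : Nat) : Int) from by omega]
    rw [PySem.List.pyGetD_natCast]

theorem pvSetD_norm {α : Type} (xs : List α) (x : α) {v n : Int} (hlen : (xs.length : Int) = n)
    (h1 : -n ≤ v) (h2 : v < n) :
    PySem.List.pySetD xs v x = xs.set (v % n).toNat x := by
  have hn : 0 < n := by omega
  have e1 := pv_emod_lo v n hn
  have e2 := pv_emod_hi v n hn
  by_cases hv : v < 0
  · have e3 := pv_emod_neg v n hn h1 hv
    rw [pySetD_wrap xs x (by omega) hv, PySem.List.pySetD_of_nonneg _ _ (by omega)]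
    congr 1
    omega
  · have e3 := pv_emod_id v n (by omega) h2
    rw [PySem.List.pySetD_of_nonneg _ _ (by omega)]
    congr 1
    omega

-- matrix[a-1][b-1] = v  is  matrix[(a-1) % n][(b-1) % n] = v  on a shaped matrix
theorem pvSetCell_wrap (n : Int) {mat : List (List Int)} (hsh : pvSh mat n.toNat)
    {a b : Int} (ha : 1 - n ≤ a ∧ a ≤ n) (hb : 1 - n ≤ b ∧ b ≤ n) (v : Int) :
    pvSetCell mat (a - 1) (b - 1) v =
      pvSetCell mat (PySem.Int.mod (a - 1) n) (PySem.Int.mod (b - 1) n) v := by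
  obtain ⟨hlen, hrows⟩ := hsh
  have hn : 0 < n := by omega
  have hlenI : (mat.length : Int) = n := by rw [hlen]; omega
  have hma : PySem.Int.mod (a - 1) n = (a - 1) % n := PySem.Int.mod_eq_emod_of_pos hn
  have hmb : PySem.Int.mod (b - 1) n = (b - 1) % n := PySem.Int.mod_eq_emod_of_pos hn
  have ea1 := pv_emod_lo (a - 1) n hn
  have ea2 := pv_emod_hi (a - 1) n hn
  have eb1 := pv_emod_lo (b - 1) n hn
  have eb2 := pv_emod_hi (b - 1) n hn
  have ea3 : ((a - 1) % n) % n = (a - 1) % n := pv_emod_id _ _ ea1 ea2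
  have eb3 : ((b - 1) % n) % n = (b - 1) % n := pv_emod_id _ _ eb1 eb2
  have ea4 : (a - 1 < 0) → (a - 1) % n = a - 1 + n := fun hv => pv_emod_neg _ _ hn (by omega) hv
  have ea5 : (0 ≤ a - 1) → (a - 1) % n = a - 1 := fun hv => pv_emod_id _ _ hv (by omega)
  have eb4 : (b - 1 < 0) → (b - 1) % n = b - 1 + n := fun hv => pv_emod_neg _ _ hn (by omega) hv
  have eb5 : (0 ≤ b - 1) → (b - 1) % n = b - 1 := fun hv => pv_emod_id _ _ hv (by omega)
  have ea6 : (a - 1) % n = if a - 1 < 0 then a - 1 + n else a - 1 := by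
    by_cases hv : a - 1 < 0
    · rw [if_pos hv]; exact ea4 hv
    · rw [if_neg hv]; exact ea5 (by omega)
  have eb6 : (b - 1) % n = if b - 1 < 0 then b - 1 + n else b - 1 := by
    by_cases hv : b - 1 < 0
    · rw [if_pos hv]; exact eb4 hv
    · rw [if_neg hv]; exact eb5 (by omega)
  have ea7 : (a - 1) % n = a - 1 + n ∨ (a - 1) % n = a - 1 := by
    by_cases hv : a - 1 < 0
    · exact Or.inl (ea4 hv)
    · exact Or.inr (ea5 (by omega))
  have eb7 : (b - 1) % n = b - 1 + n ∨ (b - 1) % n = b - 1 := by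
    by_cases hv : b - 1 < 0
    · exact Or.inl (eb4 hv)
    · exact Or.inr (eb5 (by omega))
  have hgrow : PySem.List.pyGetD mat (a - 1) [] =
      PySem.List.pyGetD mat ((a - 1) % n) [] := by
    rw [pvGetD_norm mat [] hlenI (by omega) (by omega),
        pvGetD_norm mat [] hlenI (by omega : -n ≤ (a - 1) % n) (by omega : (a - 1) % n < n)]
    congr 2
    omega
  have hsrow : ∀ (r : List Int),
      PySem.List.pySetD r (b - 1) v = PySem.List.pySetD r ((b - 1) % n) v ∨ r.length ≠ n.toNat := by
    intro r
    by_cases hr : r.length = n.toNat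
    · left
      have hrI : (r.length : Int) = n := by rw [hr]; omega
      rw [pvSetD_norm r v hrI (by omega) (by omega),
          pvSetD_norm r v hrI (by omega : -n ≤ (b - 1) % n) (by omega : (b - 1) % n < n)]
      congr 2
      omega
    · right; exact hr
  have hsmat : ∀ (row : List Int),
      PySem.List.pySetD mat (a - 1) row = PySem.List.pySetD mat ((a - 1) % n) row := by
    intro row
    rw [pvSetD_norm mat row hlenI (by omega) (by omega),
        pvSetD_norm mat row hlenI (by omega : -n ≤ (a - 1) % n) (by omega : (a - 1) % n < n)]
    congr 2
    omega
  rw [pvSetCell, pvSetCell, hma, hmb, hgrow]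
  have hrowlen : (PySem.List.pyGetD mat ((a - 1) % n) []).length = n.toNat := by
    rw [pvGetD_norm mat [] hlenI (by omega : -n ≤ (a - 1) % n) (by omega : (a - 1) % n < n), ea3]
    have hidx : ((a - 1) % n).toNat < mat.length := by omega
    rw [List.getD_eq_getElem _ _ hidx]
    exact hrows _ (List.getElem_mem hidx)
  rcases hsrow (PySem.List.pyGetD mat ((a - 1) % n) []) with h | h
  · rw [h, hsmat]
  · exact absurd hrowlen h


-- ---- A-side: matrix initialisation ----

theorem pvMat0_spec (n : Int) :
    pvSh (List.replicate n.toNat (List.replicate n.toNat (0 : Int))) n.toNat ∧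
    pvBin (List.replicate n.toNat (List.replicate n.toNat (0 : Int))) ∧
    ∀ i j : Int, 0 ≤ i → 0 ≤ j →
      pvG (List.replicate n.toNat (List.replicate n.toNat (0 : Int))) i j = 0 := by
  refine ⟨⟨by simp, ?_⟩, ?_, ?_⟩
  · intro r hr; rw [List.eq_of_mem_replicate hr]; simp
  · intro r hr x hx
    rw [List.eq_of_mem_replicate hr] at hx
    exact Or.inl (List.eq_of_mem_replicate hx)
  · intro i j hi hj
    rw [pvG_nonneg _ hi hj]
    rcases pv_getD_or (List.replicate n.toNat (List.replicate n.toNat (0 : Int))) i.toNat [] with h | h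
    · rw [List.eq_of_mem_replicate h]
      rcases pv_getD_or (List.replicate n.toNat (0 : Int)) j.toNat 0 with h2 | h2
      · exact List.eq_of_mem_replicate h2
      · exact h2
    · rw [h]; simp

theorem pvInit_fold (n : Int) (l : List (Int × Int))
    (hl : ∀ p ∈ l, 1 - n ≤ p.1 ∧ p.1 ≤ n ∧ 1 - n ≤ p.2 ∧ p.2 ≤ n) :
    ∀ (mat : List (List Int)), pvSh mat n.toNat → pvBin mat →
    pvSh (l.foldl (fun mat p => pvSetCell mat (p.1 - 1) (p.2 - 1) 1) mat) n.toNat ∧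
    pvBin (l.foldl (fun mat p => pvSetCell mat (p.1 - 1) (p.2 - 1) 1) mat) ∧
    ∀ i j : Int, 0 ≤ i → 0 ≤ j →
      (pvG (l.foldl (fun mat p => pvSetCell mat (p.1 - 1) (p.2 - 1) 1) mat) i j = 1 ↔
        pvG mat i j = 1 ∨ (i, j) ∈ pvE0 n l) := by
  induction l with
  | nil => intro mat hsh hbin; exact ⟨hsh, hbin, by simp [pvE0]⟩
  | cons p t ih =>
    intro mat hsh hbin
    have hp := hl p (List.mem_cons_self ..)
    have hn : 0 < n := by omega
    have hq1 := pvE0_bounds (relations := [p]) hn (PySem.Int.mod (p.1 - 1) n, PySem.Int.mod (p.2 - 1) n)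
      (by simp [pvE0])
    have hA : 0 ≤ PySem.Int.mod (p.1 - 1) n ∧ PySem.Int.mod (p.1 - 1) n < ((n.toNat : Nat) : Int) := by
      dsimp only at hq1; omega
    have hB : 0 ≤ PySem.Int.mod (p.2 - 1) n ∧ PySem.Int.mod (p.2 - 1) n < ((n.toNat : Nat) : Int) := by
      dsimp only at hq1; omega
    have hwrap := pvSetCell_wrap n hsh ⟨hp.1, hp.2.1⟩ ⟨hp.2.2.1, hp.2.2.2⟩ 1
    rw [List.foldl_cons]
    obtain ⟨s1, b1, c1⟩ := ih (fun q hq => hl q (List.mem_cons_of_mem _ hq))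
      (pvSetCell mat (p.1 - 1) (p.2 - 1) 1)
      (by rw [hwrap]; exact pvSetCell_sh hsh hA 1)
      (by rw [hwrap]; exact pvSetCell_bin hsh hbin hA hB.1)
    refine ⟨s1, b1, ?_⟩
    intro i j hi hj
    rw [c1 i j hi hj, hwrap, pvSetCell_G hsh hA hB 1 hi hj]
    have hmem : (i, j) ∈ pvE0 n (p :: t) ↔
        ((i = PySem.Int.mod (p.1 - 1) n ∧ j = PySem.Int.mod (p.2 - 1) n) ∨ (i, j) ∈ pvE0 n t) := by
      simp [pvE0, Prod.ext_iff]
    rw [hmem]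
    by_cases hc : i = PySem.Int.mod (p.1 - 1) n ∧ j = PySem.Int.mod (p.2 - 1) n
    · simp [hc]
    · rw [if_neg hc]; tauto

theorem pvInit_spec (n : Int) (relations : List (Int × Int))
    (hpre : ∀ p ∈ relations, 1 - n ≤ p.1 ∧ p.1 ≤ n ∧ 1 - n ≤ p.2 ∧ p.2 ≤ n) :
    pvSh (pvInit n relations) n.toNat ∧ pvBin (pvInit n relations) ∧
    ∀ i j : Int, 0 ≤ i → 0 ≤ j →
      (pvG (pvInit n relations) i j = 1 ↔ (i, j) ∈ pvE0 n relations) := by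
  obtain ⟨s0, b0, z0⟩ := pvMat0_spec n
  obtain ⟨s1, b1, c1⟩ := pvInit_fold n relations hpre _ s0 b0
  refine ⟨s1, b1, ?_⟩
  intro i j hi hj
  rw [pvInit, c1 i j hi hj, z0 i j hi hj]
  simp

-- ---- A-side: one Floyd-Warshall pass ----

def pvStepJ (k i : Int) : List (List Int) → Int → List (List Int) :=
  fun mat j => if pvG mat i k ≠ 0 ∧ pvG mat k j ≠ 0 then pvSetCell mat i j 1 else mat

def pvRowLoop (n k i : Int) (mat : List (List Int)) : List (List Int) :=
  (PySem.List.pyRange 0 n 1).foldl (pvStepJ k i) mat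

theorem pvPass_eq (n k : Int) (mat : List (List Int)) :
    pvPass n k mat = (PySem.List.pyRange 0 n 1).foldl (fun mat i => pvRowLoop n k i mat) mat := rfl

theorem pvInner_fold (n k i : Int) (hk : 0 ≤ k ∧ k < n) (hi : 0 ≤ i ∧ i < n)
    (js : List Int) (hjs : ∀ j ∈ js, 0 ≤ j ∧ j < n) :
    ∀ (mat : List (List Int)), pvSh mat n.toNat → pvBin mat →
    pvSh (js.foldl (pvStepJ k i) mat) n.toNat ∧ pvBin (js.foldl (pvStepJ k i) mat) ∧
    (∀ a b : Int, 0 ≤ a → 0 ≤ b → a ≠ i →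
      pvG (js.foldl (pvStepJ k i) mat) a b = pvG mat a b) ∧
    (∀ b : Int, 0 ≤ b →
      (pvG (js.foldl (pvStepJ k i) mat) i b ≠ 0 ↔
        pvG mat i b ≠ 0 ∨ (b ∈ js ∧ pvG mat i k ≠ 0 ∧ pvG mat k b ≠ 0))) := by
  induction js with
  | nil => intro mat hsh hbin; exact ⟨hsh, hbin, fun a b _ _ _ => rfl, fun b hb => by simp⟩
  | cons j t ih =>
    intro mat hsh hbin
    have hj := hjs j (List.mem_cons_self ..)
    have hA : 0 ≤ i ∧ i < ((n.toNat : Nat) : Int) := by omega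
    have hB : 0 ≤ j ∧ j < ((n.toNat : Nat) : Int) := by omega
    rw [List.foldl_cons]
    by_cases hc : pvG mat i k ≠ 0 ∧ pvG mat k j ≠ 0
    · rw [show pvStepJ k i mat j = pvSetCell mat i j 1 from if_pos hc]
      have G1 := fun {a b : Int} (hga : 0 ≤ a) (hgb : 0 ≤ b) =>
        pvSetCell_G (a := i) (b := j) hsh hA hB 1 hga hgb
      obtain ⟨s2, b2, other2, char2⟩ := ih (fun q hq => hjs q (List.mem_cons_of_mem _ hq))
        (pvSetCell mat i j 1) (pvSetCell_sh hsh hA 1) (pvSetCell_bin hsh hbin hA hB.1)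
      refine ⟨s2, b2, ?_, ?_⟩
      · intro a b hga hgb hne
        rw [other2 a b hga hgb hne, G1 hga hgb, if_neg (by tauto)]
      · intro b hgb
        rw [char2 b hgb]
        have e1 : pvG (pvSetCell mat i j 1) i b ≠ 0 ↔ (b = j ∨ pvG mat i b ≠ 0) := by
          rw [G1 hi.1 hgb]
          by_cases hbj : b = j
          · simp [hbj]
          · rw [if_neg (by tauto)]; tauto
        have e2 : pvG (pvSetCell mat i j 1) i k ≠ 0 ↔ pvG mat i k ≠ 0 := by
          rw [G1 hi.1 hk.1]
          by_cases hkj : k = j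
          · rw [if_pos ⟨rfl, hkj ▸ rfl⟩]
            simp only [ne_eq, one_ne_zero, not_false_eq_true, true_iff]
            exact hc.1
          · rw [if_neg (by tauto)]
        have e3 : pvG (pvSetCell mat i j 1) k b ≠ 0 ↔ pvG mat k b ≠ 0 := by
          rw [G1 hk.1 hgb]
          by_cases hki : k = i
          · subst hki
            by_cases hbj : b = j
            · subst hbj
              rw [if_pos ⟨rfl, rfl⟩]
              simp only [ne_eq, one_ne_zero, not_false_eq_true, true_iff]
              exact hc.2
            · rw [if_neg (by tauto)]
          · rw [if_neg (by tauto)]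
        rw [e1, e2, e3]
        simp only [List.mem_cons]
        by_cases hbj : b = j
        · subst hbj; tauto
        · tauto
    · rw [show pvStepJ k i mat j = mat from if_neg hc]
      obtain ⟨s2, b2, other2, char2⟩ := ih (fun q hq => hjs q (List.mem_cons_of_mem _ hq)) mat hsh hbin
      refine ⟨s2, b2, other2, ?_⟩
      intro b hgb
      rw [char2 b hgb]
      simp only [List.mem_cons]
      by_cases hbj : b = j
      · subst hbj; tauto
      · tauto

theorem pvMid_fold (n k : Int) (hk : 0 ≤ k ∧ k < n)
    (is : List Int) (his : ∀ x ∈ is, 0 ≤ x ∧ x < n) :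
    ∀ (mat : List (List Int)), pvSh mat n.toNat → pvBin mat →
    pvSh (is.foldl (fun mat i => pvRowLoop n k i mat) mat) n.toNat ∧
    pvBin (is.foldl (fun mat i => pvRowLoop n k i mat) mat) ∧
    ∀ a b : Int, 0 ≤ a → a < n → 0 ≤ b → b < n →
      (pvG (is.foldl (fun mat i => pvRowLoop n k i mat) mat) a b ≠ 0 ↔
        pvG mat a b ≠ 0 ∨ (a ∈ is ∧ pvG mat a k ≠ 0 ∧ pvG mat k b ≠ 0)) := by
  induction is with
  | nil => intro mat hsh hbin; exact ⟨hsh, hbin, fun a b _ _ _ _ => by simp⟩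
  | cons i t ih =>
    intro mat hsh hbin
    have hi := his i (List.mem_cons_self ..)
    obtain ⟨s1, b1, other1, char1⟩ := pvInner_fold n k i hk hi (PySem.List.pyRange 0 n 1)
      (fun j hj => PySem.List.mem_pyRange_one.mp hj) mat hsh hbin
    rw [List.foldl_cons]
    obtain ⟨s2, b2, char2⟩ := ih (fun q hq => his q (List.mem_cons_of_mem _ hq)) (pvRowLoop n k i mat) s1 b1
    refine ⟨s2, b2, ?_⟩
    intro a b ha0 han hb0 hbn
    rw [char2 a b ha0 han hb0 hbn]
    have hM1row : ∀ c : Int, 0 ≤ c → c < n →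
        (pvG (pvRowLoop n k i mat) i c ≠ 0 ↔ pvG mat i c ≠ 0 ∨ (pvG mat i k ≠ 0 ∧ pvG mat k c ≠ 0)) := by
      intro c hc0 hcn
      rw [pvRowLoop, char1 c hc0]
      have := PySem.List.mem_pyRange_one.mpr ⟨hc0, hcn⟩
      tauto
    have stab_ak : pvG (pvRowLoop n k i mat) a k ≠ 0 ↔ pvG mat a k ≠ 0 := by
      by_cases hai : a = i
      · subst hai; rw [hM1row k hk.1 hk.2]; tauto
      · rw [pvRowLoop, other1 a k ha0 hk.1 hai]
    have stab_kb : pvG (pvRowLoop n k i mat) k b ≠ 0 ↔ pvG mat k b ≠ 0 := by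
      by_cases hki : k = i
      · subst hki; rw [hM1row b hb0 hbn]; tauto
      · rw [pvRowLoop, other1 k b hk.1 hb0 hki]
    have main : pvG (pvRowLoop n k i mat) a b ≠ 0 ↔
        pvG mat a b ≠ 0 ∨ (a = i ∧ pvG mat a k ≠ 0 ∧ pvG mat k b ≠ 0) := by
      by_cases hai : a = i
      · subst hai; rw [hM1row b hb0 hbn]; tauto
      · rw [pvRowLoop, other1 a b ha0 hb0 hai]; tauto
    rw [main, stab_ak, stab_kb]
    simp only [List.mem_cons]
    tauto


theorem pvPass_spec (n k : Int) (hk : 0 ≤ k ∧ k < n) (mat : List (List Int))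
    (hsh : pvSh mat n.toNat) (hbin : pvBin mat) :
    pvSh (pvPass n k mat) n.toNat ∧ pvBin (pvPass n k mat) ∧
    ∀ a b : Int, 0 ≤ a → a < n → 0 ≤ b → b < n →
      (pvG (pvPass n k mat) a b ≠ 0 ↔
        pvG mat a b ≠ 0 ∨ (pvG mat a k ≠ 0 ∧ pvG mat k b ≠ 0)) := by
  obtain ⟨s, b2, c⟩ := pvMid_fold n k hk (PySem.List.pyRange 0 n 1)
    (fun x hx => PySem.List.mem_pyRange_one.mp hx) mat hsh hbin
  rw [pvPass_eq]
  refine ⟨s, b2, ?_⟩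
  intro a b ha0 han hb0 hbn
  rw [c a b ha0 han hb0 hbn]
  have := PySem.List.mem_pyRange_one.mpr ⟨ha0, han⟩
  tauto

theorem pvFW_aux (n : Int) (relations : List (Int × Int))
    (hpre : ∀ p ∈ relations, 1 - n ≤ p.1 ∧ p.1 ≤ n ∧ 1 - n ≤ p.2 ∧ p.2 ≤ n) (hn : 0 < n) :
    ∀ t : Nat, (t : Int) ≤ n →
    pvSh ((PySem.List.pyRange 0 (t : Int) 1).foldl (fun mat k => pvPass n k mat) (pvInit n relations)) n.toNat ∧
    pvBin ((PySem.List.pyRange 0 (t : Int) 1).foldl (fun mat k => pvPass n k mat) (pvInit n relations)) ∧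
    ∀ a b : Int, 0 ≤ a → a < n → 0 ≤ b → b < n →
      (pvG ((PySem.List.pyRange 0 (t : Int) 1).foldl (fun mat k => pvPass n k mat) (pvInit n relations)) a b ≠ 0 ↔
        BRch (pvE0 n relations) (t : Int) a b) := by
  intro t
  induction t with
  | zero =>
    intro ht
    obtain ⟨s0, b0, c0⟩ := pvInit_spec n relations hpre
    rw [show ((0 : Nat) : Int) = 0 from rfl, PySem.List.pyRange_one_eq_nil le_rfl, List.foldl_nil]
    refine ⟨s0, b0, ?_⟩
    intro a b ha0 han hb0 hbn
    have ht0 : ∀ p ∈ pvE0 n relations, 0 ≤ p.2 := by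
      intro p hp
      have := pvE0_bounds hn p hp
      omega
    rw [brch_zero ht0, ← c0 a b ha0 hb0]
    rcases pvG_bin b0 ha0 hb0 with h | h <;> rw [h] <;> simp
  | succ t ih =>
    intro ht
    have ht' : (t : Int) ≤ n := by push_cast at ht ⊢; omega
    have htn : (t : Int) < n := by push_cast at ht; omega
    obtain ⟨s, b2, c⟩ := ih ht'
    have hcast : ((t + 1 : Nat) : Int) = (t : Int) + 1 := by push_cast; ring
    rw [hcast, PySem.List.pyRange_one_succ_right (by positivity), List.foldl_append,
        List.foldl_cons, List.foldl_nil]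
    obtain ⟨s3, b3, c3⟩ := pvPass_spec n (t : Int) ⟨by positivity, htn⟩ _ s b2
    refine ⟨s3, b3, ?_⟩
    intro a b ha0 han hb0 hbn
    rw [c3 a b ha0 han hb0 hbn, c a b ha0 han hb0 hbn,
        c a (t : Int) ha0 han (by positivity) htn, c (t : Int) b (by positivity) htn hb0 hbn]
    exact (brch_succ (E := pvE0 n relations) (k := (t : Int))).symm

theorem pvA_char (n : Int) (relations : List (Int × Int)) (hn : 0 < n)
    (hpre : ∀ p ∈ relations, 1 - n ≤ p.1 ∧ p.1 ≤ n ∧ 1 - n ≤ p.2 ∧ p.2 ≤ n) :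
    pvSh (pvFW n (pvInit n relations)) n.toNat ∧ pvBin (pvFW n (pvInit n relations)) ∧
    ∀ a b : Int, 0 ≤ a → a < n → 0 ≤ b → b < n →
      (pvG (pvFW n (pvInit n relations)) a b ≠ 0 ↔ Rch (pvE0 n relations) a b) := by
  have haux := pvFW_aux n relations hpre hn n.toNat (by omega)
  rw [Int.toNat_of_nonneg (by omega : (0:Int) ≤ n)] at haux
  obtain ⟨s, b2, c⟩ := haux
  refine ⟨s, b2, ?_⟩
  intro a b ha0 han hb0 hbn
  rw [pvFW, c a b ha0 han hb0 hbn]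
  have ht : ∀ p ∈ pvE0 n relations, p.2 < n := by
    intro p hp
    have := pvE0_bounds hn p hp
    omega
  exact (rch_iff_brch ht).symm

theorem pvCell_iff (n : Int) (relations : List (Int × Int)) (hn : 0 < n)
    (hpre : ∀ p ∈ relations, 1 - n ≤ p.1 ∧ p.1 ≤ n ∧ 1 - n ≤ p.2 ∧ p.2 ≤ n)
    {a b : Nat} (ha : (a : Int) < n) (hb : (b : Int) < n) :
    pvG (pvFW n (pvInit n relations)) (a : Int) (b : Int) = 1 ↔
      Rch (pvE0 n relations) (a : Int) (b : Int) := by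
  obtain ⟨hsh, hbin, hchar⟩ := pvA_char n relations hn hpre
  have h1 := hchar (a : Int) (b : Int) (by positivity) ha (by positivity) hb
  constructor
  · intro h
    exact h1.mp (by rw [h]; exact one_ne_zero)
  · intro h
    rcases pvG_bin hbin (i := (a : Int)) (j := (b : Int)) (by positivity) (by positivity) with h0 | h0
    · exact absurd (h1.mpr h) (by rw [h0]; simp)
    · exact h0


-- ---- B-side: adjacency list characterisation ----

theorem pvAdjL_fold (n : Int) (hn : 0 < n) (l : List (Int × Int))
    (hl : ∀ p ∈ l, 1 - n ≤ p.1 ∧ p.1 ≤ n ∧ 1 - n ≤ p.2 ∧ p.2 ≤ n) :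
    ∀ (acc : List (List Int)), (acc.length : Int) = n →
    ((l.foldl (fun adj p =>
        PySem.List.pySetD adj (p.1 - 1) (PySem.List.pyGetD adj (p.1 - 1) [] ++ [p.2 - 1])) acc).length : Int) = n ∧
    ∀ r : Nat, (r : Int) < n →
      (l.foldl (fun adj p =>
        PySem.List.pySetD adj (p.1 - 1) (PySem.List.pyGetD adj (p.1 - 1) [] ++ [p.2 - 1])) acc).getD r [] =
        acc.getD r [] ++ (l.filter (fun p => ((p.1 - 1) % n).toNat == r)).map (fun p => p.2 - 1) := by
  induction l with
  | nil => intro acc hacc; exact ⟨hacc, fun r hr => by simp⟩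
  | cons p t ih =>
    intro acc hacc
    have hp := hl p (List.mem_cons_self ..)
    have hb1 : -n ≤ p.1 - 1 ∧ p.1 - 1 < n := by omega
    have hc : 0 ≤ (p.1 - 1) % n ∧ (p.1 - 1) % n < n :=
      ⟨pv_emod_lo _ _ hn, pv_emod_hi _ _ hn⟩
    have hstep : PySem.List.pySetD acc (p.1 - 1) (PySem.List.pyGetD acc (p.1 - 1) [] ++ [p.2 - 1]) =
        acc.set ((p.1 - 1) % n).toNat
          (acc.getD ((p.1 - 1) % n).toNat [] ++ [p.2 - 1]) := by
      rw [pvGetD_norm acc [] hacc hb1.1 hb1.2, pvSetD_norm acc _ hacc hb1.1 hb1.2]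
    rw [List.foldl_cons, hstep]
    obtain ⟨len2, rows2⟩ := ih (fun q hq => hl q (List.mem_cons_of_mem _ hq))
      (acc.set ((p.1 - 1) % n).toNat (acc.getD ((p.1 - 1) % n).toNat [] ++ [p.2 - 1]))
      (by rw [List.length_set]; exact hacc)
    refine ⟨len2, ?_⟩
    intro r hr
    rw [rows2 r hr, pv_getD_set_or]
    by_cases hcr : ((p.1 - 1) % n).toNat = r
    · rw [if_pos ⟨hcr, by omega⟩, List.filter_cons_of_pos (by simpa using hcr), List.map_cons,
          hcr, List.append_assoc, List.singleton_append]
    · rw [if_neg (by tauto), List.filter_cons_of_neg (by simpa using hcr)]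

theorem pvAdjL_spec (n : Int) (relations : List (Int × Int)) (hn : 0 < n)
    (hpre : ∀ p ∈ relations, 1 - n ≤ p.1 ∧ p.1 ≤ n ∧ 1 - n ≤ p.2 ∧ p.2 ≤ n) :
    ((pvAdjL n relations).length : Int) = n ∧
    ∀ r : Nat, (r : Int) < n →
      (pvAdjL n relations).getD r [] =
        (relations.filter (fun p => ((p.1 - 1) % n).toNat == r)).map (fun p => p.2 - 1) := by
  obtain ⟨hlen, hrows⟩ := pvAdjL_fold n hn relations hpre (List.replicate n.toNat [])
    (by rw [List.length_replicate]; omega)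
  refine ⟨hlen, ?_⟩
  intro r hr
  rw [pvAdjL, hrows r hr]
  rcases pv_getD_or (List.replicate n.toNat ([] : List Int)) r [] with h | h
  · rw [List.eq_of_mem_replicate h, List.nil_append]
  · rw [h, List.nil_append]

theorem pvRow_bounds (n : Int) (relations : List (Int × Int)) (hn : 0 < n)
    (hpre : ∀ p ∈ relations, 1 - n ≤ p.1 ∧ p.1 ≤ n ∧ 1 - n ≤ p.2 ∧ p.2 ≤ n)
    (r : Nat) (hr : (r : Int) < n) :
    ∀ w ∈ (pvAdjL n relations).getD r [], -n ≤ w ∧ w < n := by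
  intro w hw
  rw [(pvAdjL_spec n relations hn hpre).2 r hr] at hw
  obtain ⟨q, hq, he⟩ := List.mem_map.mp hw
  have := hpre q (List.mem_filter.mp hq).1
  omega

theorem pvEdge_iff (n : Int) (relations : List (Int × Int)) (hn : 0 < n)
    (hpre : ∀ p ∈ relations, 1 - n ≤ p.1 ∧ p.1 ≤ n ∧ 1 - n ≤ p.2 ∧ p.2 ≤ n)
    (r : Nat) (hr : (r : Int) < n) (j : Int) :
    ((r : Int), j) ∈ pvE0 n relations ↔
      ∃ w ∈ (pvAdjL n relations).getD r [], PySem.Int.mod w n = j := by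
  rw [(pvAdjL_spec n relations hn hpre).2 r hr]
  simp only [pvE0, List.mem_map, List.mem_filter, Prod.mk.injEq, beq_iff_eq]
  constructor
  · rintro ⟨q, hq, h1, h2⟩
    rw [PySem.Int.mod_eq_emod_of_pos hn] at h1 h2
    have e1 := pv_emod_lo (q.1 - 1) n hn
    refine ⟨q.2 - 1, ⟨q, ⟨hq, by omega⟩, rfl⟩, ?_⟩
    rw [PySem.Int.mod_eq_emod_of_pos hn]
    exact h2
  · rintro ⟨w, ⟨q, ⟨hq, hq1⟩, he⟩, hmod⟩
    have e1 := pv_emod_lo (q.1 - 1) n hn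
    refine ⟨q, hq, ?_, ?_⟩
    · rw [PySem.Int.mod_eq_emod_of_pos hn]; omega
    · rw [← hmod, ← he, PySem.Int.mod_eq_emod_of_pos hn]

theorem pvAdjAt (n : Int) (relations : List (Int × Int)) (hn : 0 < n)
    (hpre : ∀ p ∈ relations, 1 - n ≤ p.1 ∧ p.1 ≤ n ∧ 1 - n ≤ p.2 ∧ p.2 ≤ n)
    {v : Int} (h1 : -n ≤ v) (h2 : v < n) :
    PySem.List.pyGetD (pvAdjL n relations) v [] = (pvAdjL n relations).getD (v % n).toNat [] :=
  pvGetD_norm _ _ (pvAdjL_spec n relations hn hpre).1 h1 h2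


-- ---- B-side: boolean seen-array helpers ----

theorem pv_count_set_true (l : List Bool) (k : Nat) (hk : k < l.length) (hf : l.getD k false = false) :
    (l.set k true).count true = l.count true + 1 := by
  induction l generalizing k with
  | nil => simp at hk
  | cons a t ih =>
    cases k with
    | zero =>
      simp only [List.getD_cons_zero] at hf
      subst hf
      simp [List.count_cons]
    | succ k =>
      simp only [List.getD_cons_succ] at hf
      simp only [List.length_cons] at hk
      rw [List.set_cons_succ, List.count_cons, List.count_cons, ih k (by omega) hf]
      omega

theorem pv_all_true (l : List Bool) (h : l.count true = l.length) :
    ∀ k : Nat, k < l.length → l.getD k false = true := by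
  have hall := List.count_eq_length.mp h
  intro k hk
  rw [List.getD_eq_getElem _ _ hk]
  exact (hall _ (List.getElem_mem hk)).symm

theorem pv_count_idx_bool (l : List Bool) :
    l.count true = (List.range l.length).countP (fun j => l.getD j false) := by
  induction l with
  | nil => simp
  | cons a t ih =>
    rw [List.length_cons, List.range_succ_eq_map, List.countP_cons, List.countP_map]
    simp only [List.getD_cons_zero, List.getD_cons_succ, Function.comp_def]
    rw [List.count_cons, ih]
    rcases Bool.eq_false_or_eq_true a with h | h <;> subst h <;> simp <;> omega


-- ---- B-side: one BFS round over the frontier ----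

def pvStepB (adj : List (List Int)) (acc : List Bool × List Int) (v : Int) : List Bool × List Int :=
  if PySem.List.pyGetD acc.1 v false then acc
  else (PySem.List.pySetD acc.1 v true, acc.2 ++ PySem.List.pyGetD adj v [])

theorem pvRoundB_eq (adj : List (List Int)) (st : List Bool × List Int) :
    pvRoundB adj st = st.2.foldl (pvStepB adj) (st.1, []) := rfl

theorem pvRoundFoldB (n : Int) (hn : 0 < n) (adj : List (List Int)) (hAL : (adj.length : Int) = n)
    (fl : List Int) (hfl : ∀ v ∈ fl, -n ≤ v ∧ v < n) :
    ∀ (seen : List Bool) (nxt : List Int), (seen.length : Int) = n →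
    (((fl.foldl (pvStepB adj) (seen, nxt)).1.length : Int) = n) ∧
    (∀ k : Nat, seen.getD k false = true → (fl.foldl (pvStepB adj) (seen, nxt)).1.getD k false = true) ∧
    (∀ k : Nat, (fl.foldl (pvStepB adj) (seen, nxt)).1.getD k false = true →
      seen.getD k false = true ∨ ∃ v ∈ fl, (v % n).toNat = k) ∧
    (((fl.foldl (pvStepB adj) (seen, nxt)).1 = seen ∧ (fl.foldl (pvStepB adj) (seen, nxt)).2 = nxt) ∨
      (fl.foldl (pvStepB adj) (seen, nxt)).1.count true ≥ seen.count true + 1) ∧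
    (∀ v ∈ fl, (fl.foldl (pvStepB adj) (seen, nxt)).1.getD (v % n).toNat false = true) ∧
    (∀ v ∈ fl, seen.getD (v % n).toNat false = false →
      ∀ w ∈ adj.getD (v % n).toNat [], w ∈ (fl.foldl (pvStepB adj) (seen, nxt)).2) ∧
    (∀ w ∈ (fl.foldl (pvStepB adj) (seen, nxt)).2,
      w ∈ nxt ∨ ∃ v ∈ fl, w ∈ adj.getD (v % n).toNat []) ∧
    (∀ w ∈ nxt, w ∈ (fl.foldl (pvStepB adj) (seen, nxt)).2) := by
  induction fl with
  | nil =>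
    intro seen nxt hsl
    refine ⟨hsl, fun k h => h, fun k h => Or.inl h, Or.inl ⟨rfl, rfl⟩,
      fun v hv => absurd hv (List.not_mem_nil), ?_, fun w hw => Or.inl hw, fun w hw => hw⟩
    intro v hv
    exact absurd hv List.not_mem_nil
  | cons v t ih =>
    intro seen nxt hsl
    have hv := hfl v (List.mem_cons_self ..)
    have hcb : 0 ≤ v % n ∧ v % n < n := ⟨pv_emod_lo _ _ hn, pv_emod_hi _ _ hn⟩
    have hclen : (v % n).toNat < seen.length := by omega
    have hget : PySem.List.pyGetD seen v false = seen.getD (v % n).toNat false :=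
      pvGetD_norm seen false hsl hv.1 hv.2
    rw [List.foldl_cons]
    by_cases hS : seen.getD (v % n).toNat false = true
    · rw [show pvStepB adj (seen, nxt) v = (seen, nxt) from by
        simp only [pvStepB]; rw [hget, if_pos hS]]
      obtain ⟨l1, mono1, src1, prog1, cov1, exp1, frs1, nm1⟩ :=
        ih (fun u hu => hfl u (List.mem_cons_of_mem _ hu)) seen nxt hsl
      refine ⟨l1, mono1, ?_, prog1, ?_, ?_, ?_, nm1⟩
      · intro k hk
        rcases src1 k hk with h | ⟨u, hu, he⟩
        · exact Or.inl h
        · exact Or.inr ⟨u, List.mem_cons_of_mem _ hu, he⟩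
      · intro u hu
        rcases List.mem_cons.mp hu with h | h
        · subst h; exact mono1 _ hS
        · exact cov1 u h
      · intro u hu hUf
        rcases List.mem_cons.mp hu with h | h
        · subst h; exact absurd hS (by rw [hUf]; simp)
        · exact exp1 u h hUf
      · intro w hw
        rcases frs1 w hw with h | ⟨u, hu, h⟩
        · exact Or.inl h
        · exact Or.inr ⟨u, List.mem_cons_of_mem _ hu, h⟩
    · have hSf : seen.getD (v % n).toNat false = false := by
        rcases Bool.eq_false_or_eq_true (seen.getD (v % n).toNat false) with h | h
        · exact absurd h hS
        · exact h
      have hset : PySem.List.pySetD seen v true = seen.set (v % n).toNat true :=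
        pvSetD_norm seen true hsl hv.1 hv.2
      have hrow : PySem.List.pyGetD adj v [] = adj.getD (v % n).toNat [] :=
        pvGetD_norm adj [] hAL hv.1 hv.2
      rw [show pvStepB adj (seen, nxt) v =
          (seen.set (v % n).toNat true, nxt ++ adj.getD (v % n).toNat []) from by
        simp only [pvStepB]; rw [hget, if_neg (by rw [hSf]; simp), hset, hrow]]
      obtain ⟨l1, mono1, src1, prog1, cov1, exp1, frs1, nm1⟩ :=
        ih (fun u hu => hfl u (List.mem_cons_of_mem _ hu))
          (seen.set (v % n).toNat true) (nxt ++ adj.getD (v % n).toNat [])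
          (by rw [List.length_set]; exact hsl)
      have hsget : ∀ k : Nat, (seen.set (v % n).toNat true).getD k false =
          if (v % n).toNat = k ∧ (v % n).toNat < seen.length then true else seen.getD k false :=
        fun k => pv_getD_set_or seen _ k true false
      refine ⟨l1, ?_, ?_, ?_, ?_, ?_, ?_, ?_⟩
      · intro k hk
        apply mono1
        rw [hsget k]
        by_cases h : (v % n).toNat = k ∧ (v % n).toNat < seen.length
        · rw [if_pos h]
        · rw [if_neg h]; exact hk
      · intro k hk
        rcases src1 k hk with h | ⟨u, hu, he⟩
        · rw [hsget k] at h
          by_cases hck : (v % n).toNat = k ∧ (v % n).toNat < seen.length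
          · exact Or.inr ⟨v, List.mem_cons_self .., hck.1⟩
          · rw [if_neg hck] at h; exact Or.inl h
        · exact Or.inr ⟨u, List.mem_cons_of_mem _ hu, he⟩
      · right
        have hcnt : (seen.set (v % n).toNat true).count true = seen.count true + 1 :=
          pv_count_set_true seen _ hclen hSf
        rcases prog1 with ⟨h1, _⟩ | h
        · rw [h1, hcnt]
        · omega
      · intro u hu
        rcases List.mem_cons.mp hu with h | h
        · subst h
          apply mono1
          rw [hsget, if_pos ⟨rfl, hclen⟩]
        · exact cov1 u h
      · intro u hu hUf
        by_cases hcu : (u % n).toNat = (v % n).toNat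
        · intro w hw
          rw [hcu] at hw
          exact nm1 w (List.mem_append_right _ hw)
        · rcases List.mem_cons.mp hu with h | h
          · subst h; exact absurd rfl hcu
          · refine exp1 u h ?_
            rw [hsget, if_neg (by tauto)]
            exact hUf
      · intro w hw
        rcases frs1 w hw with h | ⟨u, hu, h⟩
        · rcases List.mem_append.mp h with h | h
          · exact Or.inl h
          · exact Or.inr ⟨v, List.mem_cons_self .., h⟩
        · exact Or.inr ⟨u, List.mem_cons_of_mem _ hu, h⟩
      · intro w hw
        exact nm1 w (List.mem_append_left _ hw)


-- ---- B-side: per-source BFS invariant ----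

def pvInvB (n : Int) (relations : List (Int × Int)) (s : Int) (st : List Bool × List Int) : Prop :=
  ((st.1.length : Int) = n) ∧
  (∀ k : Nat, st.1.getD k false = true → Rch (pvE0 n relations) s (k : Int)) ∧
  (∀ v ∈ st.2, (-n ≤ v ∧ v < n) ∧ Rch (pvE0 n relations) s (PySem.Int.mod v n)) ∧
  (∀ w ∈ (pvAdjL n relations).getD s.toNat [],
    w ∈ st.2 ∨ st.1.getD (w % n).toNat false = true) ∧
  (∀ k : Nat, st.1.getD k false = true → ∀ w ∈ (pvAdjL n relations).getD k [],
    w ∈ st.2 ∨ st.1.getD (w % n).toNat false = true)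

theorem pvInvB_init (n : Int) (relations : List (Int × Int)) (hn : 0 < n)
    (hpre : ∀ p ∈ relations, 1 - n ≤ p.1 ∧ p.1 ≤ n ∧ 1 - n ≤ p.2 ∧ p.2 ≤ n)
    (s : Nat) (hs : (s : Int) < n) :
    pvInvB n relations (s : Int)
      (List.replicate n.toNat false, PySem.List.pyGetD (pvAdjL n relations) (s : Int) []) := by
  have hfalse : ∀ k : Nat, (List.replicate n.toNat false).getD k false = false := by
    intro k
    rcases pv_getD_or (List.replicate n.toNat false) k false with h | h
    · exact List.eq_of_mem_replicate h
    · exact h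
  have hinitrow : PySem.List.pyGetD (pvAdjL n relations) (s : Int) [] =
      (pvAdjL n relations).getD ((s : Int)).toNat [] := by
    rw [pvAdjAt n relations hn hpre (by omega) hs, pv_emod_id (s : Int) n (by positivity) hs]
  refine ⟨by rw [List.length_replicate]; omega, ?_, ?_, ?_, ?_⟩
  · intro k hk
    exact absurd hk (by rw [hfalse k]; simp)
  · intro v hv
    rw [hinitrow] at hv
    simp only [Int.toNat_natCast] at hv
    have hvb := pvRow_bounds n relations hn hpre s hs v hv
    refine ⟨hvb, Rch.edge ?_⟩
    exact (pvEdge_iff n relations hn hpre s hs _).mpr ⟨v, hv, rfl⟩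
  · intro w hw
    simp only [Int.toNat_natCast] at hw
    left
    rw [hinitrow]
    simpa using hw
  · intro k hk
    exact absurd hk (by rw [hfalse k]; simp)

theorem pvInvB_step (n : Int) (relations : List (Int × Int)) (hn : 0 < n)
    (hpre : ∀ p ∈ relations, 1 - n ≤ p.1 ∧ p.1 ≤ n ∧ 1 - n ≤ p.2 ∧ p.2 ≤ n)
    (s : Int) (st : List Bool × List Int) (h : pvInvB n relations s st) :
    pvInvB n relations s (if st.2 = [] then st else pvRoundB (pvAdjL n relations) st) := by
  by_cases hst : st.2 = []
  · rw [if_pos hst]; exact h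
  · rw [if_neg hst, pvRoundB_eq]
    obtain ⟨hlen, hr1, hfr, hbase, hcl⟩ := h
    have hAL := (pvAdjL_spec n relations hn hpre).1
    obtain ⟨l1, mono1, src1, prog1, cov1, exp1, frs1, nm1⟩ :=
      pvRoundFoldB n hn (pvAdjL n relations) hAL st.2 (fun v hv => (hfr v hv).1) st.1 [] hlen
    refine ⟨l1, ?_, ?_, ?_, ?_⟩
    · intro k hk
      rcases src1 k hk with h | ⟨v, hv, he⟩
      · exact hr1 k h
      · have := (hfr v hv).2
        rw [PySem.Int.mod_eq_emod_of_pos hn] at this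
        have hvb := (hfr v hv).1
        have e1 := pv_emod_lo v n hn
        have e2 := pv_emod_hi v n hn
        rw [show ((k : Nat) : Int) = v % n from by omega]
        exact this
    · intro w hw
      rcases frs1 w hw with h | ⟨v, hv, h⟩
      · exact absurd h List.not_mem_nil
      · have hvb := (hfr v hv).1
        have e1 := pv_emod_lo v n hn
        have e2 := pv_emod_hi v n hn
        have hcv : ((v % n).toNat : Int) < n := by omega
        have hwb := pvRow_bounds n relations hn hpre (v % n).toNat hcv w h
        refine ⟨hwb, ?_⟩
        have hedge : (((v % n).toNat : Int), PySem.Int.mod w n) ∈ pvE0 n relations :=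
          (pvEdge_iff n relations hn hpre (v % n).toNat hcv _).mpr ⟨w, h, rfl⟩
        have hrch := (hfr v hv).2
        rw [PySem.Int.mod_eq_emod_of_pos hn] at hrch
        rw [show ((v % n).toNat : Int) = v % n from by omega] at hedge
        exact Rch.tail hrch hedge
    · intro w hw
      rcases hbase w hw with h | h
      · exact Or.inr (cov1 w h)
      · exact Or.inr (mono1 _ h)
    · intro k hk w hw
      rcases src1 k hk with hkold | ⟨v, hv, he⟩
      · rcases hcl k hkold w hw with h | h
        · exact Or.inr (cov1 w h)
        · exact Or.inr (mono1 _ h)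
      · by_cases hkseen : st.1.getD k false = true
        · rcases hcl k hkseen w hw with h | h
          · exact Or.inr (cov1 w h)
          · exact Or.inr (mono1 _ h)
        · have hkf : st.1.getD k false = false := by
            rcases Bool.eq_false_or_eq_true (st.1.getD k false) with h | h
            · exact absurd h hkseen
            · exact h
          left
          apply exp1 v hv (by rw [he]; exact hkf)
          rw [he]
          exact hw

theorem pvIterB_inv (n : Int) (relations : List (Int × Int)) (hn : 0 < n)
    (hpre : ∀ p ∈ relations, 1 - n ≤ p.1 ∧ p.1 ≤ n ∧ 1 - n ≤ p.2 ∧ p.2 ≤ n) (s : Int) :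
    ∀ (l : List Int) (st : List Bool × List Int), pvInvB n relations s st →
      pvInvB n relations s
        (l.foldl (fun st _ => if st.2 = [] then st else pvRoundB (pvAdjL n relations) st) st) := by
  intro l
  induction l with
  | nil => intro st h; exact h
  | cons x t ih =>
    intro st h
    rw [List.foldl_cons]
    exact ih _ (pvInvB_step n relations hn hpre s st h)

theorem pvIterB_stall (adj : List (List Int)) :
    ∀ (l : List Int) (st : List Bool × List Int), st.2 = [] →
      l.foldl (fun st _ => if st.2 = [] then st else pvRoundB adj st) st = st := by
  intro l
  induction l with
  | nil => intro st h; rfl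
  | cons x t ih =>
    intro st h
    rw [List.foldl_cons, if_pos h]
    exact ih st h

theorem pvIterB_grow (n : Int) (relations : List (Int × Int)) (hn : 0 < n)
    (hpre : ∀ p ∈ relations, 1 - n ≤ p.1 ∧ p.1 ≤ n ∧ 1 - n ≤ p.2 ∧ p.2 ≤ n) (s : Int) :
    ∀ (l : List Int) (st : List Bool × List Int), pvInvB n relations s st →
      (l.foldl (fun st _ => if st.2 = [] then st else pvRoundB (pvAdjL n relations) st) st).2 ≠ [] →
      (l.foldl (fun st _ => if st.2 = [] then st else pvRoundB (pvAdjL n relations) st) st).1.count true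
        ≥ st.1.count true + l.length := by
  intro l
  induction l with
  | nil => intro st hinv h; simp
  | cons x t ih =>
    intro st hinv h
    rw [List.foldl_cons] at h ⊢
    by_cases hst : st.2 = []
    · rw [if_pos hst] at h
      rw [pvIterB_stall _ t st hst] at h
      exact absurd hst h
    · rw [if_neg hst] at h ⊢
      have hAL := (pvAdjL_spec n relations hn hpre).1
      obtain ⟨hlen, hr1, hfr, hbase, hcl⟩ := hinv
      obtain ⟨l1, mono1, src1, prog1, cov1, exp1, frs1, nm1⟩ :=
        pvRoundFoldB n hn (pvAdjL n relations) hAL st.2 (fun v hv => (hfr v hv).1) st.1 [] hlen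
      have hinv' : pvInvB n relations s (pvRoundB (pvAdjL n relations) st) := by
        have := pvInvB_step n relations hn hpre s st ⟨hlen, hr1, hfr, hbase, hcl⟩
        rw [if_neg hst] at this
        exact this
      have hthis := ih (pvRoundB (pvAdjL n relations) st) hinv' h
      rw [pvRoundB_eq] at *
      rcases prog1 with ⟨h1, h2⟩ | hc
      · rw [pvIterB_stall _ t _ h2] at h
        exact absurd h2 h
      · simp only [List.length_cons]
        omega

theorem pvSeen_char (n : Int) (relations : List (Int × Int)) (hn : 0 < n)
    (hpre : ∀ p ∈ relations, 1 - n ≤ p.1 ∧ p.1 ≤ n ∧ 1 - n ≤ p.2 ∧ p.2 ≤ n)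
    (s : Nat) (hs : (s : Int) < n) :
    (((pvSeen n (pvAdjL n relations) (s : Int)).length : Int) = n) ∧
    ∀ k : Nat, ((pvSeen n (pvAdjL n relations) (s : Int)).getD k false = true ↔
      Rch (pvE0 n relations) (s : Int) (k : Int)) := by
  have hinv := pvIterB_inv n relations hn hpre (s : Int) (PySem.List.pyRange 0 n 1)
    _ (pvInvB_init n relations hn hpre s hs)
  set F := (PySem.List.pyRange 0 n 1).foldl
    (fun st _ => if st.2 = [] then st else pvRoundB (pvAdjL n relations) st)
    (List.replicate n.toNat false, PySem.List.pyGetD (pvAdjL n relations) (s : Int) []) with hF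
  obtain ⟨hlen, hr1, hfr, hbase, hcl⟩ := hinv
  have hFr : ∀ v ∈ F.2, F.1.getD (v % n).toNat false = true := by
    by_cases hempty : F.2 = []
    · rw [hempty]; intro v hv; exact absurd hv List.not_mem_nil
    · have hgrow := pvIterB_grow n relations hn hpre (s : Int) (PySem.List.pyRange 0 n 1)
        _ (pvInvB_init n relations hn hpre s hs) (by rw [← hF]; exact hempty)
      rw [← hF] at hgrow
      have hc0 : (List.replicate n.toNat false).count true = 0 :=
        List.count_eq_zero.mpr (by simp)
      have hlr : (PySem.List.pyRange 0 n 1).length = n.toNat := by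
        rw [PySem.List.length_pyRange_one]
        congr 1
        omega
      have hcle : F.1.count true ≤ F.1.length := List.count_le_length
      have hFlen : F.1.length = n.toNat := by omega
      have hfull : F.1.count true = F.1.length := by omega
      intro v hv
      have hvb := (hfr v hv).1
      have e1 := pv_emod_lo v n hn
      have e2 := pv_emod_hi v n hn
      exact pv_all_true F.1 hfull _ (by omega)
  have hclose1 : ∀ w ∈ (pvAdjL n relations).getD s [],
      F.1.getD (w % n).toNat false = true := by
    intro w hw
    rcases hbase w (by simpa using hw) with h | h
    · exact hFr w h
    · exact h
  have hclose2 : ∀ k : Nat, F.1.getD k false = true →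
      ∀ w ∈ (pvAdjL n relations).getD k [], F.1.getD (w % n).toNat false = true := by
    intro k hk w hw
    rcases hcl k hk w hw with h | h
    · exact hFr w h
    · exact h
  have hcomplete0 : ∀ a v : Int, Rch (pvE0 n relations) a v → a = (s : Int) →
      F.1.getD v.toNat false = true := by
    intro a v hv
    induction hv with
    | @edge b h =>
      intro ha
      subst ha
      obtain ⟨w, hw, hwm⟩ := (pvEdge_iff n relations hn hpre s hs b).mp h
      have := hclose1 w hw
      rw [PySem.Int.mod_eq_emod_of_pos hn] at hwm
      rw [← hwm]
      exact this
    | @tail b c h h2 ih =>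
      intro ha
      subst ha
      have hbb := pvE0_bounds hn _ h2
      dsimp only at hbb
      have hbcast : ((b.toNat : Nat) : Int) = b := by omega
      have h2' : ((b.toNat : Int), c) ∈ pvE0 n relations := by rw [hbcast]; exact h2
      obtain ⟨w, hw, hwm⟩ := (pvEdge_iff n relations hn hpre b.toNat (by omega) c).mp h2'
      have := hclose2 b.toNat (ih rfl) w hw
      rw [PySem.Int.mod_eq_emod_of_pos hn] at hwm
      rw [← hwm]
      exact this
  have hcomplete : ∀ v : Int, Rch (pvE0 n relations) (s : Int) v → F.1.getD v.toNat false = true :=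
    fun v hv => hcomplete0 _ v hv rfl
  refine ⟨hlen, ?_⟩
  intro k
  constructor
  · intro hk
    exact hr1 k hk
  · intro hk
    have := hcomplete (k : Int) hk
    simpa using this


-- ---- final counting bridge ----

theorem pv_sum_count (l : List Int) (h : ∀ x ∈ l, x = 0 ∨ x = 1) :
    l.sum = (l.count 1 : Int) := by
  induction l with
  | nil => simp
  | cons a t ih =>
    have ha := h a (List.mem_cons_self ..)
    have ht := ih (fun x hx => h x (List.mem_cons_of_mem _ hx))
    rcases ha with ha | ha <;> subst ha <;> simp [List.count_cons, ht] <;> omega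

theorem pv_count_idx (l : List Int) :
    l.count 1 = (List.range l.length).countP (fun j => l.getD j 0 == 1) := by
  induction l with
  | nil => simp
  | cons a t ih =>
    rw [List.length_cons, List.range_succ_eq_map, List.countP_cons, List.countP_map]
    simp only [List.getD_cons_zero, List.getD_cons_succ, Function.comp_def]
    rw [List.count_cons, ih]

theorem pvRowSum (n : Int) (relations : List (Int × Int)) (hn : 0 < n)
    (hpre : ∀ p ∈ relations, 1 - n ≤ p.1 ∧ p.1 ≤ n ∧ 1 - n ≤ p.2 ∧ p.2 ≤ n)
    (k : Nat) (hk : (k : Int) < n) :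
    (PySem.List.pyGetD (pvFW n (pvInit n relations)) (k : Int) []).sum =
      ((List.range n.toNat).countP
        (fun j : Nat => decide (pvG (pvFW n (pvInit n relations)) (k : Int) (j : Int) = 1)) : Int) := by
  obtain ⟨⟨hlen, hrows⟩, hbin, hchar⟩ := pvA_char n relations hn hpre
  have hrowD : PySem.List.pyGetD (pvFW n (pvInit n relations)) (k : Int) [] =
      (pvFW n (pvInit n relations)).getD k [] := PySem.List.pyGetD_natCast _ _ _
  have hkl : k < (pvFW n (pvInit n relations)).length := by omega
  have hmemrow : (pvFW n (pvInit n relations)).getD k [] ∈ pvFW n (pvInit n relations) := by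
    rw [List.getD_eq_getElem _ _ hkl]
    exact List.getElem_mem _
  have hbinrow : ∀ x ∈ (pvFW n (pvInit n relations)).getD k [], x = 0 ∨ x = 1 :=
    fun x hx => hbin _ hmemrow x hx
  have hlenrow : ((pvFW n (pvInit n relations)).getD k []).length = n.toNat :=
    hrows _ hmemrow
  rw [hrowD, pv_sum_count _ hbinrow, pv_count_idx, hlenrow]
  have hge : ∀ j : Nat, ((pvFW n (pvInit n relations)).getD k []).getD j 0 =
      pvG (pvFW n (pvInit n relations)) (k : Int) (j : Int) := by
    intro j
    rw [pvG_nonneg _ (by positivity) (by positivity)]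
    simp
  have hcongr : (List.range n.toNat).countP (fun j => ((pvFW n (pvInit n relations)).getD k []).getD j 0 == 1) =
      (List.range n.toNat).countP (fun j : Nat => decide (pvG (pvFW n (pvInit n relations)) (k : Int) (j : Int) = 1)) := by
    apply List.countP_congr
    intro j hj
    rw [hge j]
    simp
  rw [hcongr]

theorem pvColSum (n : Int) (relations : List (Int × Int)) (hn : 0 < n)
    (hpre : ∀ p ∈ relations, 1 - n ≤ p.1 ∧ p.1 ≤ n ∧ 1 - n ≤ p.2 ∧ p.2 ≤ n)
    (k : Nat) (hk : (k : Int) < n) :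
    ((pvFW n (pvInit n relations)).map (fun row => PySem.List.pyGetD row (k : Int) 0)).sum =
      ((List.range n.toNat).countP
        (fun s : Nat => decide (pvG (pvFW n (pvInit n relations)) (s : Int) (k : Int) = 1)) : Int) := by
  obtain ⟨⟨hlen, hrows⟩, hbin, hchar⟩ := pvA_char n relations hn hpre
  have hbincol : ∀ x ∈ (pvFW n (pvInit n relations)).map (fun row => PySem.List.pyGetD row (k : Int) 0),
      x = 0 ∨ x = 1 := by
    intro x hx
    obtain ⟨row, hrow, hxe⟩ := List.mem_map.mp hx
    rw [← hxe, PySem.List.pyGetD_natCast]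
    rcases pv_getD_or row k 0 with h | h
    · exact hbin row hrow _ h
    · rw [h]; simp
  have hlencol : ((pvFW n (pvInit n relations)).map (fun row => PySem.List.pyGetD row (k : Int) 0)).length = n.toNat := by
    rw [List.length_map]; exact hlen
  rw [pv_sum_count _ hbincol, pv_count_idx, hlencol]
  congr 1
  apply List.countP_congr
  intro s hs
  have hsN : s < n.toNat := List.mem_range.mp hs
  have hslen : s < (pvFW n (pvInit n relations)).length := by omega
  have hge : ((pvFW n (pvInit n relations)).map (fun row => PySem.List.pyGetD row (k : Int) 0)).getD s 0 =
      pvG (pvFW n (pvInit n relations)) (s : Int) (k : Int) := by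
    rw [List.getD_eq_getElem _ _ (by rw [List.length_map]; omega), List.getElem_map,
        PySem.List.pyGetD_natCast, pvG_nonneg _ (by positivity) (by positivity)]
    simp only [Int.toNat_natCast]
    congr 1
    rw [List.getD_eq_getElem _ _ hslen]
  rw [hge]
  simp

theorem pv_foldl_append_map {α β : Type} (f : α → β) :
    ∀ (l : List α) (acc : List β), l.foldl (fun acc s => acc ++ [f s]) acc = acc ++ l.map f := by
  intro l
  induction l with
  | nil => intro acc; simp
  | cons a t ih =>
    intro acc
    rw [List.foldl_cons, ih, List.map_cons, List.append_assoc, List.singleton_append]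

def pvReachL (n : Int) (relations : List (Int × Int)) : List (List Bool) :=
  (PySem.List.pyRange 0 n 1).foldl
    (fun acc s => acc ++ [pvSeen n (pvAdjL n relations) s]) ([] : List (List Bool))

theorem pvReachL_map (n : Int) (relations : List (Int × Int)) :
    pvReachL n relations = (PySem.List.pyRange 0 n 1).map (fun s => pvSeen n (pvAdjL n relations) s) := by
  rw [pvReachL, pv_foldl_append_map, List.nil_append]

theorem pvReachL_at (n : Int) (relations : List (Int × Int)) {i : Int} (h0 : 0 ≤ i) (h1 : i < n) :
    PySem.List.pyGetD (pvReachL n relations) i [] = pvSeen n (pvAdjL n relations) i := by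
  rw [pvReachL_map]
  exact PySem.List.pyGetD_map_pyRange_of_nonneg _ _ _ _ h0 h1

theorem pvCellB_iff (n : Int) (relations : List (Int × Int)) (hn : 0 < n)
    (hpre : ∀ p ∈ relations, 1 - n ≤ p.1 ∧ p.1 ≤ n ∧ 1 - n ≤ p.2 ∧ p.2 ≤ n)
    (s k : Nat) (hs : (s : Int) < n) :
    ((pvSeen n (pvAdjL n relations) (s : Int)).getD k false = true ↔
      pvG (pvFW n (pvInit n relations)) (s : Int) (k : Int) = 1) := by
  rw [(pvSeen_char n relations hn hpre s hs).2 k]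
  by_cases hk : (k : Int) < n
  · exact (pvCell_iff n relations hn hpre hs hk).symm
  · constructor
    · intro h
      obtain ⟨p, hp, hp2⟩ := rch_target h
      have := pvE0_bounds hn p hp
      omega
    · intro h
      obtain ⟨hsh, hbin, hchar⟩ := pvA_char n relations hn hpre
      obtain ⟨hlen, hrows⟩ := hsh
      exfalso
      rw [pvG_nonneg _ (by positivity) (by positivity)] at h
      rcases pv_getD_or (pvFW n (pvInit n relations)) ((s : Int)).toNat [] with hr | hr
      · rcases pv_getD_or ((pvFW n (pvInit n relations)).getD ((s : Int)).toNat []) ((k : Int)).toNat 0 with hx | hx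
        · have hrl := hrows _ hr
          have : ((k : Int)).toNat < ((pvFW n (pvInit n relations)).getD ((s : Int)).toNat []).length := by
            by_contra hcon
            rw [List.getD_eq_default _ _ (by omega)] at h
            simp at h
          omega
        · rw [hx] at h; simp at h
      · rw [hr] at h; simp at h

theorem pvSeenCount (n : Int) (relations : List (Int × Int)) (hn : 0 < n)
    (hpre : ∀ p ∈ relations, 1 - n ≤ p.1 ∧ p.1 ≤ n ∧ 1 - n ≤ p.2 ∧ p.2 ≤ n)
    (k : Nat) (hk : (k : Int) < n) :
    ((pvSeen n (pvAdjL n relations) (k : Int)).count true : Int) =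
      (PySem.List.pyGetD (pvFW n (pvInit n relations)) (k : Int) []).sum := by
  rw [pvRowSum n relations hn hpre k hk]
  obtain ⟨hlen, hchar⟩ := pvSeen_char n relations hn hpre k hk
  rw [pv_count_idx_bool, show (pvSeen n (pvAdjL n relations) (k : Int)).length = n.toNat from by omega]
  congr 1
  apply List.countP_congr
  intro j hj
  have := pvCellB_iff n relations hn hpre k j hk
  rcases Bool.eq_false_or_eq_true ((pvSeen n (pvAdjL n relations) (k : Int)).getD j false) with h | h
  · rw [h]
    have := this.mp h
    simp [this]
  · rw [h]
    have : ¬ pvG (pvFW n (pvInit n relations)) (k : Int) (j : Int) = 1 := by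
      intro hc
      have := this.mpr hc
      rw [h] at this
      simp at this
    simp [this]

theorem wallshall_spec : Claim_equal_wallshall := by
  intro n m relations _ hpre
  unfold Spec_wallshall
  have hA : wallshall n m relations =
      (PySem.List.pyRange 0 n 1).foldl (fun count i =>
        if (PySem.List.pyGetD (pvFW n (pvInit n relations)) i []).sum
            + ((pvFW n (pvInit n relations)).map (fun row => PySem.List.pyGetD row i 0)).sum = n - 1
        then count + 1 else count) 0 := rfl
  have hB : wallshall_alt n m relations =
      (PySem.List.pyRange 0 n 1).foldl (fun count i =>
        if ((PySem.List.pyGetD (pvReachL n relations) i []).count true : Int)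
            + (PySem.List.pyRange 0 n 1).foldl
                (fun t s => if PySem.List.pyGetD (PySem.List.pyGetD (pvReachL n relations) s []) i false then t + 1 else t) 0
            = n - 1
        then count + 1 else count) 0 := rfl
  by_cases hn : 0 < n
  · rw [hA, hB]
    rw [PySem.List.foldl_ite_add_one (fun i : Int =>
      (PySem.List.pyGetD (pvFW n (pvInit n relations)) i []).sum
        + ((pvFW n (pvInit n relations)).map (fun row => PySem.List.pyGetD row i 0)).sum = n - 1)]
    rw [PySem.List.foldl_ite_add_one (fun i : Int =>
      ((PySem.List.pyGetD (pvReachL n relations) i []).count true : Int)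
        + (PySem.List.pyRange 0 n 1).foldl
            (fun t s => if PySem.List.pyGetD (PySem.List.pyGetD (pvReachL n relations) s []) i false then t + 1 else t) 0
        = n - 1)]
    rw [PySem.List.pyRange_zero n, List.countP_map, List.countP_map]
    simp only [zero_add]
    rw [Nat.cast_inj]
    apply List.countP_congr
    intro k hkr
    have hk : k < n.toNat := List.mem_range.mp hkr
    have hkI : (k : Int) < n := by omega
    have hreachk := pvReachL_at n relations (by positivity : (0:Int) ≤ (k : Int)) hkI
    have hinner : (PySem.List.pyRange 0 n 1).foldl
        (fun t s => if PySem.List.pyGetD (PySem.List.pyGetD (pvReachL n relations) s []) (k : Int) false then t + 1 else t) 0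
        = ((pvFW n (pvInit n relations)).map (fun row => PySem.List.pyGetD row (k : Int) 0)).sum := by
      rw [pvColSum n relations hn hpre k hkI,
          PySem.List.foldl_ite_add_one (fun s : Int =>
            PySem.List.pyGetD (PySem.List.pyGetD (pvReachL n relations) s []) (k : Int) false = true),
          PySem.List.pyRange_zero n, List.countP_map, zero_add, Nat.cast_inj]
      apply List.countP_congr
      intro s hsr
      have hs : s < n.toNat := List.mem_range.mp hsr
      have hsI : (s : Int) < n := by omega
      have h64 := pvSeen_char n relations hn hpre s hsI
      have hgetk : PySem.List.pyGetD (pvSeen n (pvAdjL n relations) (s : Int)) (k : Int) false =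
          (pvSeen n (pvAdjL n relations) (s : Int)).getD k false :=
        PySem.List.pyGetD_natCast _ _ _
      simp only [Function.comp_apply]
      rw [pvReachL_at n relations (by positivity) hsI, hgetk]
      have hiff := pvCellB_iff n relations hn hpre s k hsI
      rcases Bool.eq_false_or_eq_true ((pvSeen n (pvAdjL n relations) (s : Int)).getD k false) with h | h
      · rw [h]
        have := hiff.mp h
        simp [this]
      · rw [h]
        have : ¬ pvG (pvFW n (pvInit n relations)) (s : Int) (k : Int) = 1 := by
          intro hc
          have := hiff.mpr hc
          rw [h] at this
          simp at this
        simp [this]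
    rw [PySem.List.pyRange_zero n] at hinner
    simp only [Function.comp_apply]
    rw [hreachk, hinner, pvSeenCount n relations hn hpre k hkI]
  · have h1 : PySem.List.pyRange 0 n 1 = [] := PySem.List.pyRange_one_eq_nil (by omega)
    rw [hA, hB, h1, List.foldl_nil, List.foldl_nil]
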